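-- pv_equiv track=rewrite | github.com/MahadjiAraman/blank-app | pipeline_core.py | _flatten_attributes_list
-- ===== SOURCE A (Python) =====
-- from collections import defaultdict
--
-- def _flatten_attributes_list(items_list: list) -> dict:
--     """Flatten attribute list handling duplicate keys."""
--     if not items_list:
--         return {}
--
--     flat_dict = {}
--     key_counts = defaultdict(int)
--     valid_items = [item for item in items_list if item.get('k')]
--
--     for item in valid_items:
--         key_counts[item['k']] += 1
--
--     key_instance_counter = defaultdict(int)
--     for item in valid_items:
--         key, value = item['k'], item.get('v')
--         if key_counts[key] > 1:
--             key_instance_counter[key] += 1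
--             final_key = f"{key} {key_instance_counter[key]}"
--         else:
--             final_key = key
--         flat_dict[final_key] = value
--
--     return flat_dict
-- ===== SOURCE B (Python) =====
-- def _flatten_attributes_list(items_list: list) -> dict:
--     """Flatten attribute list handling duplicate keys."""
--     if not items_list:
--         return {}
--     pairs = [(item['k'], item.get('v')) for item in items_list if item.get('k')]
--     positions = {}
--     for i, (k, _) in enumerate(pairs):
--         positions.setdefault(k, []).append(i)
--     names = [None] * len(pairs)
--     for k, idxs in positions.items():
--         if len(idxs) == 1:
--             names[idxs[0]] = k
--         else:
--             for j, p in enumerate(idxs, 1):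
--                 names[p] = f"{k} {j}"
--     return {names[i]: v for i, (_, v) in enumerate(pairs)}
-- ===== Notes on version B (the rewrite author's own statement) =====
-- stated objective: alternative
-- what changed: Instead of A's two running counter dicts over the flat item list, B groups positions by key (key -> ordered index list), scatters the disambiguated names into a slot array per group, and builds the result dict in one final position-order pass.
import Mathlib
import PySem

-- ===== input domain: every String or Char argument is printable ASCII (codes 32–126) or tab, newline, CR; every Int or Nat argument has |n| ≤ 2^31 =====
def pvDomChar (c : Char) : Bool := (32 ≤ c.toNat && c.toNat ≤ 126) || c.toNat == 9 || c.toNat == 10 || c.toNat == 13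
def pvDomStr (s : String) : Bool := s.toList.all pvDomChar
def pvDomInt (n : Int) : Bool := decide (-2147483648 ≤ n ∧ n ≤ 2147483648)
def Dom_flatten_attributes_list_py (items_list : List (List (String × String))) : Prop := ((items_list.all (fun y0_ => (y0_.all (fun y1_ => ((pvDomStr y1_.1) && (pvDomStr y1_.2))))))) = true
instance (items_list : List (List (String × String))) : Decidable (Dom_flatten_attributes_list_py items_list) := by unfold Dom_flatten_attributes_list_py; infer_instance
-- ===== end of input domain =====

-- B replaces A's two running counter dicts with a group-by: a dict key -> ordered list of
-- positions, a scatter of the disambiguated names into a slot array, and one final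
-- position-order pass building the dict (alternative decomposition; same O(n) cost).

-- item.get('k') is truthy iff key 'k' is present with a non-empty value (the guard both Pythons share)
def pvKeyTruthy (item : List (String × String)) : Bool :=
  match (PySem.Dict.mk item).get? "k" with
  | some s => s != ""
  | none => false

-- item['k']; on filtered items the key is present, so the getD "" default is unreachable
def pvKeyOf (item : List (String × String)) : String :=
  ((PySem.Dict.mk item).get? "k").getD ""

-- ===== PORT A =====
def flatten_attributes_list_py (items_list : List (List (String × String))) : List (String × Option String) :=
  if items_list = [] then []
  else
    let valid := items_list.filter pvKeyTruthy
    let key_counts : PySem.Dict String Int :=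
      valid.foldl (fun d item => d.insert (pvKeyOf item) (d.getD (pvKeyOf item) 0 + 1)) PySem.Dict.empty
    (valid.foldl
      (fun (st : PySem.Dict String Int × PySem.Dict String (Option String)) item =>
        let key := pvKeyOf item
        let value := (PySem.Dict.mk item).get? "v"
        if key_counts.getD key 0 > 1 then
          let kic := st.1.insert key (st.1.getD key 0 + 1)
          (kic, st.2.insert (key ++ " " ++ PySem.Int.toStr (kic.getD key 0)) value)
        else
          (st.1, st.2.insert key value))
      (PySem.Dict.empty, PySem.Dict.empty)).2.items

-- ===== PORT B =====
def flatten_attributes_list_py_alt (items_list : List (List (String × String))) : List (String × Option String) :=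
  if items_list = [] then []
  else
    let pairs : List (String × Option String) :=
      (items_list.filter pvKeyTruthy).map (fun item => (pvKeyOf item, (PySem.Dict.mk item).get? "v"))
    -- positions.setdefault(k, []).append(i)
    let positions : PySem.Dict String (List Int) :=
      (PySem.List.enumerate pairs).foldl
        (fun d p => d.modify p.2.1 [] (fun l => l ++ [p.1])) PySem.Dict.empty
    -- names = [None]*len(pairs); scatter the final names per group
    let names : List (Option String) :=
      positions.items.foldl
        (fun ns g =>
          if g.2.length = 1 then
            PySem.List.pySetD ns (g.2.getD 0 0) (some g.1)   -- idxs[0]: group lists are non-empty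
          else
            (PySem.List.enumerate g.2 1).foldl
              (fun ns q => PySem.List.pySetD ns q.2 (some (g.1 ++ " " ++ PySem.Int.toStr q.1))) ns)
        (List.replicate pairs.length none)
    -- {names[i]: v for i, (_, v) in enumerate(pairs)}; names[i] is always filled, the getD "" is unreachable
    ((PySem.List.enumerate pairs).foldl
      (fun (d : PySem.Dict String (Option String)) p =>
        d.insert ((PySem.List.pyGetD names p.1 none).getD "") p.2.2)
      PySem.Dict.empty).items

-- ===== PRECONDITION & SPEC =====
def Spec_flatten_attributes_list_py (items_list : List (List (String × String))) (out : List (String × Option String)) : Prop := out = flatten_attributes_list_py_alt items_list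
instance (items_list : List (List (String × String))) (out : List (String × Option String)) : Decidable (Spec_flatten_attributes_list_py items_list out) := by unfold Spec_flatten_attributes_list_py; infer_instance

-- ===== CLAIM (what is proved, stated in full; the proofs are below) =====
def Claim_equal_flatten_attributes_list_py : Prop := ∀ (items_list : List (List (String × String))), Dom_flatten_attributes_list_py items_list → Spec_flatten_attributes_list_py items_list (flatten_attributes_list_py items_list)

-- ===== LEMMAS AND PROOFS =====

-- The common middle form both ports are reduced to: a single enumerate-fold inserting, for
-- position i with key k, the bare key when it is unique and "k <count of k in keys[:i+1]>" otherwise.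
def pvMid (pairs : List (String × Option String)) : PySem.Dict String (Option String) :=
  (PySem.List.enumerate pairs).foldl
    (fun (d : PySem.Dict String (Option String)) p =>
      d.insert
        (if (pairs.map Prod.fst).count p.2.1 = 1 then p.2.1
         else p.2.1 ++ " " ++
           PySem.Int.toStr (((PySem.List.slice (pairs.map Prod.fst) none (some (p.1 + 1))).count p.2.1 : Int)))
        p.2.2)
    PySem.Dict.empty

-- Core loop equivalence for A: A's stateful second pass over the remaining pairs `l`, started after
-- the prefix `pre` of already-processed keys, inserts the same (final key, value) sequence as the
-- middle enumerate-fold, provided the consulted count dict `kc` reports the counts of the full key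
-- list `K` and the instance counter `kic` reports the counts of `pre` on all duplicated keys.
theorem pv_core (K : List String) (kc : PySem.Dict String Int)
    (hkc : ∀ j, kc.getD j 0 = (K.count j : Int)) :
    ∀ (l : List (String × Option String)) (pre : List String)
      (kic : PySem.Dict String Int) (d : PySem.Dict String (Option String)),
      K = pre ++ l.map Prod.fst →
      (∀ j, 1 < K.count j → kic.getD j 0 = (pre.count j : Int)) →
      (l.foldl
        (fun (st : PySem.Dict String Int × PySem.Dict String (Option String)) p =>
          if kc.getD p.1 0 > 1 then
            let kic := st.1.insert p.1 (st.1.getD p.1 0 + 1)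
            (kic, st.2.insert (p.1 ++ " " ++ PySem.Int.toStr (kic.getD p.1 0)) p.2)
          else
            (st.1, st.2.insert p.1 p.2)) (kic, d)).2
      = ((PySem.List.enumerate l (pre.length : Int)).foldl
          (fun (d : PySem.Dict String (Option String)) p =>
            d.insert
              (if K.count p.2.1 = 1 then p.2.1
               else p.2.1 ++ " " ++
                 PySem.Int.toStr (((PySem.List.slice K none (some (p.1 + 1))).count p.2.1 : Int)))
              p.2.2) d) := by
  intro l
  induction l with
  | nil => intro pre kic d hK hinv; simp [PySem.List.enumerate_nil]
  | cons p t ih =>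
    obtain ⟨k, v⟩ := p
    intro pre kic d hK hinv
    rw [PySem.List.enumerate_cons, List.foldl_cons, List.foldl_cons]
    simp only []
    have hK' : K = (pre ++ [k]) ++ t.map Prod.fst := by simpa using hK
    have hmem : 1 ≤ K.count k := by
      rw [hK]; simp [List.count_append]; omega
    have htake : PySem.List.slice K none (some ((pre.length : Int) + 1)) = pre ++ [k] := by
      have h1 : ((pre.length : Int) + 1) = ((pre.length + 1 : Nat) : Int) := by push_cast; ring
      rw [h1, PySem.List.slice_to_natCast, hK, List.map_cons, List.take_append]
      simp
    have hoff : (pre.length : Int) + 1 = (((pre ++ [k]).length : Nat) : Int) := by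
      simp
    by_cases hdup : 1 < K.count k
    · have hc1 : kc.getD k 0 > 1 := by rw [hkc]; exact_mod_cast hdup
      have hc2 : ¬ (K.count k = 1) := by omega
      rw [if_pos hc1, if_neg hc2, htake]
      have hkic : kic.getD k 0 = (pre.count k : Int) := hinv k hdup
      have hstr : (kic.insert k (kic.getD k 0 + 1)).getD k 0 = (((pre ++ [k]).count k : Nat) : Int) := by
        rw [PySem.Dict.getD_insert_self, hkic]
        simp [List.count_append]
      rw [hstr, hoff]
      apply ih (pre ++ [k]) _ _ hK'
      intro j hj
      rw [PySem.Dict.getD_insert]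
      by_cases hjk : j = k
      · subst hjk; rw [if_pos rfl, hkic]; simp [List.count_append]
      · rw [if_neg hjk, hinv j hj]; simp [List.count_append, Ne.symm hjk]
    · have hc1 : ¬ (kc.getD k 0 > 1) := by rw [hkc]; exact_mod_cast hdup
      have hc2 : K.count k = 1 := by omega
      rw [if_neg hc1, if_pos hc2, hoff]
      apply ih (pre ++ [k]) _ _ hK'
      intro j hj
      have hjk : j ≠ k := by intro h; subst h; omega
      rw [hinv j hj]; simp [List.count_append, Ne.symm hjk]

-- A's non-empty body equals the middle form.
theorem pv_bodyA (valid : List (List (String × String))) :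
    (valid.foldl
      (fun (st : PySem.Dict String Int × PySem.Dict String (Option String)) item =>
        let key := pvKeyOf item
        let value := (PySem.Dict.mk item).get? "v"
        if (valid.foldl (fun d item => d.insert (pvKeyOf item) (d.getD (pvKeyOf item) 0 + 1))
              (PySem.Dict.empty : PySem.Dict String Int)).getD key 0 > 1 then
          let kic := st.1.insert key (st.1.getD key 0 + 1)
          (kic, st.2.insert (key ++ " " ++ PySem.Int.toStr (kic.getD key 0)) value)
        else
          (st.1, st.2.insert key value))
      (PySem.Dict.empty, PySem.Dict.empty)).2
    = pvMid (valid.map (fun item => (pvKeyOf item, (PySem.Dict.mk item).get? "v"))) := by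
  unfold pvMid
  have hKeq : ((valid.map (fun item => (pvKeyOf item, (PySem.Dict.mk item).get? "v"))).map Prod.fst)
      = valid.map pvKeyOf := by rw [List.map_map]; rfl
  rw [hKeq]
  generalize hg : (valid.foldl (fun d item => d.insert (pvKeyOf item) (d.getD (pvKeyOf item) 0 + 1))
      (PySem.Dict.empty : PySem.Dict String Int)) = kc
  have h1 : (valid.map pvKeyOf).foldl (fun d x => d.insert x (d.getD x 0 + 1))
      (PySem.Dict.empty : PySem.Dict String Int) = kc := by rw [List.foldl_map, hg]
  have hkc : ∀ j, kc.getD j 0 = ((valid.map pvKeyOf).count j : Int) := by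
    intro j; rw [← h1, PySem.Dict.getD_foldl_insert_add_one]; simp
  have hA : (valid.foldl
      (fun (st : PySem.Dict String Int × PySem.Dict String (Option String)) item =>
        let key := pvKeyOf item
        let value := (PySem.Dict.mk item).get? "v"
        if kc.getD key 0 > 1 then
          let kic := st.1.insert key (st.1.getD key 0 + 1)
          (kic, st.2.insert (key ++ " " ++ PySem.Int.toStr (kic.getD key 0)) value)
        else
          (st.1, st.2.insert key value))
      (PySem.Dict.empty, PySem.Dict.empty))
      = ((valid.map (fun item => (pvKeyOf item, (PySem.Dict.mk item).get? "v"))).foldl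
        (fun (st : PySem.Dict String Int × PySem.Dict String (Option String)) p =>
          if kc.getD p.1 0 > 1 then
            let kic := st.1.insert p.1 (st.1.getD p.1 0 + 1)
            (kic, st.2.insert (p.1 ++ " " ++ PySem.Int.toStr (kic.getD p.1 0)) p.2)
          else
            (st.1, st.2.insert p.1 p.2))
        (PySem.Dict.empty, PySem.Dict.empty)) := by
    rw [List.foldl_map]
  rw [hA]
  have hcore := pv_core (valid.map pvKeyOf) kc hkc
    (valid.map (fun item => (pvKeyOf item, (PySem.Dict.mk item).get? "v")))
    [] PySem.Dict.empty PySem.Dict.empty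
    (by rw [List.map_map]; rfl) (by intro j hj; simp)
  simpa using hcore

-- ---- B side ----

-- The ordered index list of positions (counted from `s`) whose pair carries key `k`.
def pvE (k : String) (s : Int) (l : List (String × Option String)) : List Int :=
  ((PySem.List.enumerate l s).filter (fun p => p.2.1 == k)).map (·.1)

theorem pvE_nil (k : String) (s : Int) : pvE k s [] = [] := rfl

theorem pvE_cons (k : String) (s : Int) (p : String × Option String) (t : List (String × Option String)) :
    pvE k s (p :: t) = (if p.1 = k then [s] else []) ++ pvE k (s + 1) t := by
  simp only [pvE, PySem.List.enumerate_cons, List.filter_cons]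
  by_cases h : p.1 = k <;> simp [h]

theorem pvE_mem_bounds (k : String) :
    ∀ (l : List (String × Option String)) (s : Int), ∀ x ∈ pvE k s l, s ≤ x ∧ x < s + l.length := by
  intro l
  induction l with
  | nil => intro s x hx; simp [pvE_nil] at hx
  | cons p t ih =>
    intro s x hx
    rw [pvE_cons] at hx
    rcases List.mem_append.mp hx with h | h
    · have hxs : x = s := by
        by_cases hp : p.1 = k
        · simpa [hp] using h
        · simp [hp] at h
      subst hxs
      refine ⟨le_refl _, ?_⟩
      simp only [List.length_cons]
      push_cast
      omega
    · have := ih (s + 1) x h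
      refine ⟨by omega, ?_⟩
      simp only [List.length_cons]
      push_cast
      omega

theorem pvE_pairwise (k : String) :
    ∀ (l : List (String × Option String)) (s : Int), (pvE k s l).Pairwise (· < ·) := by
  intro l
  induction l with
  | nil => intro s; simp [pvE_nil]
  | cons p t ih =>
    intro s
    rw [pvE_cons]
    by_cases hp : p.1 = k
    · rw [if_pos hp, List.singleton_append]
      refine List.pairwise_cons.mpr ⟨fun x hx => ?_, ih (s + 1)⟩
      have := pvE_mem_bounds k t (s + 1) x hx
      omega
    · rw [if_neg hp, List.nil_append]
      exact ih (s + 1)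

theorem pvE_length (k : String) :
    ∀ (l : List (String × Option String)) (s : Int),
      (pvE k s l).length = (l.map Prod.fst).count k := by
  intro l
  induction l with
  | nil => intro s; simp [pvE_nil]
  | cons p t ih =>
    intro s
    rw [pvE_cons]
    by_cases hp : p.1 = k <;>
      simp [hp, ih (s + 1)]

theorem pvE_key_of_mem (k : String) :
    ∀ (l : List (String × Option String)) (s : Int), ∀ x ∈ pvE k s l,
      ∃ (j : Nat) (p : String × Option String), x = s + j ∧ l[j]? = some p ∧ p.1 = k := by
  intro l
  induction l with
  | nil => intro s x hx; simp [pvE_nil] at hx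
  | cons p t ih =>
    intro s x hx
    rw [pvE_cons] at hx
    rcases List.mem_append.mp hx with h | h
    · have hp : p.1 = k := by
        by_cases hp : p.1 = k
        · exact hp
        · simp [hp] at h
      have hxs : x = s := by simp [hp] at h; exact h
      exact ⟨0, p, by simp [hxs], by simp, hp⟩
    · obtain ⟨j, q, hxj, hget, hq⟩ := ih (s + 1) x h
      exact ⟨j + 1, q, by omega, by simpa using hget, hq⟩

theorem pvE_mem_of_get (k : String) :
    ∀ (l : List (String × Option String)) (s : Int) (j : Nat) (p : String × Option String),
      l[j]? = some p → p.1 = k → (s + j) ∈ pvE k s l := by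
  intro l
  induction l with
  | nil => intro s j p h; simp at h
  | cons q t ih =>
    intro s j p hget hp
    rw [pvE_cons]
    cases j with
    | zero =>
      simp at hget
      subst hget
      simp [hp]
    | succ j' =>
      simp only [List.getElem?_cons_succ] at hget
      apply List.mem_append.mpr
      right
      have h2 := ih (s + 1) j' p hget hp
      have he : (s + 1) + (j' : Int) = s + ((j' + 1 : Nat) : Int) := by push_cast; ring
      rwa [he] at h2

theorem pvE_count_take (k : String) :
    ∀ (l : List (String × Option String)) (s : Int), ∀ x ∈ pvE k s l,
      ((l.map Prod.fst).take ((x - s).toNat + 1)).count k = (pvE k s l).idxOf x + 1 := by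
  intro l
  induction l with
  | nil => intro s x hx; simp [pvE_nil] at hx
  | cons p t ih =>
    intro s x hx
    rw [pvE_cons] at hx
    rw [pvE_cons]
    by_cases hp : p.1 = k
    · rw [if_pos hp, List.singleton_append] at hx ⊢
      rcases List.mem_cons.mp hx with hxs | hxt
      · subst hxs
        simp [List.idxOf_cons_self, hp]
      · have hb := pvE_mem_bounds k t (s + 1) x hxt
        have hxne : s ≠ x := by omega
        have hm : (x - s).toNat + 1 = ((x - (s + 1)).toNat + 1) + 1 := by omega
        rw [hm, List.map_cons, List.take_succ_cons, List.count_cons,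
          List.idxOf_cons_ne _ hxne, ih (s + 1) x hxt]
        simp [hp]
    · rw [if_neg hp, List.nil_append] at hx ⊢
      have hb := pvE_mem_bounds k t (s + 1) x hx
      have hm : (x - s).toNat + 1 = ((x - (s + 1)).toNat + 1) + 1 := by omega
      rw [hm, List.map_cons, List.take_succ_cons, List.count_cons, ih (s + 1) x hx]
      simp [hp]

-- one scatter step (one group) and the whole scatter loop, exactly as written in the port
def pvGroupStep (ns : List (Option String)) (g : String × List Int) : List (Option String) :=
  if g.2.length = 1 then
    PySem.List.pySetD ns (g.2.getD 0 0) (some g.1)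
  else
    (PySem.List.enumerate g.2 1).foldl
      (fun ns q => PySem.List.pySetD ns q.2 (some (g.1 ++ " " ++ PySem.Int.toStr q.1))) ns

def pvScat (gs : List (String × List Int)) (ns : List (Option String)) : List (Option String) :=
  gs.foldl pvGroupStep ns

theorem pvMulti_len (k : String) :
    ∀ (I : List Int) (s : Int) (ns : List (Option String)),
      ((PySem.List.enumerate I s).foldl
        (fun ns q => PySem.List.pySetD ns q.2 (some (k ++ " " ++ PySem.Int.toStr q.1))) ns).length
      = ns.length := by
  intro I
  induction I with
  | nil => intro s ns; simp [PySem.List.enumerate_nil]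
  | cons a t ih =>
    intro s ns
    rw [PySem.List.enumerate_cons, List.foldl_cons, ih, PySem.List.length_pySetD]

theorem pvMulti_skip (k : String) :
    ∀ (I : List Int) (s : Int) (ns : List (Option String)) (i : Nat),
      (∀ x ∈ I, 0 ≤ x) → (i : Int) ∉ I →
      ((PySem.List.enumerate I s).foldl
        (fun ns q => PySem.List.pySetD ns q.2 (some (k ++ " " ++ PySem.Int.toStr q.1))) ns)[i]?
      = ns[i]? := by
  intro I
  induction I with
  | nil => intro s ns i _ _; simp [PySem.List.enumerate_nil]
  | cons a t ih =>
    intro s ns i hnn hni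
    rw [PySem.List.enumerate_cons, List.foldl_cons]
    dsimp only
    have ha : 0 ≤ a := hnn a (by simp)
    have hne : a.toNat ≠ i := by
      intro h
      apply hni
      have : a = (i : Int) := by omega
      simp [← this]
    rw [ih (s + 1) _ i (fun x hx => hnn x (by simp [hx])) (fun h => hni (by simp [h])),
      PySem.List.pySetD_of_nonneg _ _ ha, List.getElem?_set_ne hne]

theorem pvMulti_hit (k : String) :
    ∀ (I : List Int) (s : Int) (ns : List (Option String)) (i : Nat),
      I.Pairwise (· < ·) → (∀ x ∈ I, 0 ≤ x ∧ x < (ns.length : Int)) → (i : Int) ∈ I →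
      ((PySem.List.enumerate I s).foldl
        (fun ns q => PySem.List.pySetD ns q.2 (some (k ++ " " ++ PySem.Int.toStr q.1))) ns)[i]?
      = some (some (k ++ " " ++ PySem.Int.toStr (s + (I.idxOf (i : Int) : Int)))) := by
  intro I
  induction I with
  | nil => intro s ns i _ _ h; simp at h
  | cons a t ih =>
    intro s ns i hpw hb hi
    rw [PySem.List.enumerate_cons, List.foldl_cons]
    dsimp only
    have ha := hb a (by simp)
    by_cases hai : a = (i : Int)
    · have hnt : (i : Int) ∉ t := by
        intro h
        have := (List.pairwise_cons.mp hpw).1 _ h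
        omega
      rw [pvMulti_skip k t (s + 1) _ i (fun x hx => (hb x (by simp [hx])).1) hnt,
        PySem.List.pySetD_of_nonneg _ _ ha.1]
      have hia : a.toNat = i := by omega
      rw [hia, List.getElem?_set_self (by omega), hai, List.idxOf_cons_self]
      simp
    · have hit : (i : Int) ∈ t := by
        rcases List.mem_cons.mp hi with h | h
        · omega
        · exact h
      have hlen : (PySem.List.pySetD ns a (some (k ++ " " ++ PySem.Int.toStr s))).length = ns.length :=
        PySem.List.length_pySetD _ _ _
      rw [ih (s + 1) _ i (List.pairwise_cons.mp hpw).2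
        (fun x hx => ⟨(hb x (by simp [hx])).1,
          by rw [hlen]; exact (hb x (by simp [hx])).2⟩) hit]
      rw [List.idxOf_cons_ne _ hai]
      have harith : s + 1 + ((List.idxOf ((i : Int)) t : Nat) : Int)
          = s + (((List.idxOf ((i : Int)) t).succ : Nat) : Int) := by
        push_cast [Nat.succ_eq_add_one]
        ring
      rw [harith]

theorem pvGroupStep_len (ns : List (Option String)) (g : String × List Int) :
    (pvGroupStep ns g).length = ns.length := by
  unfold pvGroupStep
  split
  · exact PySem.List.length_pySetD _ _ _
  · exact pvMulti_len g.1 g.2 1 ns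

theorem pvGroupStep_skip (ns : List (Option String)) (g : String × List Int) (i : Nat)
    (hnn : ∀ x ∈ g.2, 0 ≤ x) (hni : (i : Int) ∉ g.2) :
    (pvGroupStep ns g)[i]? = ns[i]? := by
  unfold pvGroupStep
  split
  · next hlen =>
    obtain ⟨a, ha⟩ := List.length_eq_one_iff.mp hlen
    have h0 : g.2.getD 0 0 = a := by simp [ha]
    have hann : 0 ≤ a := hnn a (by simp [ha])
    have hne : a.toNat ≠ i := by
      intro h
      apply hni
      have : a = (i : Int) := by omega
      simp [ha, ← this]
    rw [h0, PySem.List.pySetD_of_nonneg _ _ hann, List.getElem?_set_ne hne]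
  · exact pvMulti_skip g.1 g.2 1 ns i hnn hni

theorem pvGroupStep_hit (ns : List (Option String)) (g : String × List Int) (i : Nat)
    (hpw : g.2.Pairwise (· < ·)) (hb : ∀ x ∈ g.2, 0 ≤ x ∧ x < (ns.length : Int))
    (hi : (i : Int) ∈ g.2) :
    (pvGroupStep ns g)[i]?
    = some (some (if g.2.length = 1 then g.1
        else g.1 ++ " " ++ PySem.Int.toStr (1 + (g.2.idxOf (i : Int) : Int)))) := by
  unfold pvGroupStep
  split
  · next hlen =>
    obtain ⟨a, ha⟩ := List.length_eq_one_iff.mp hlen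
    have hia' : (i : Int) = a := by simpa [ha] using hi
    have hbi := hb a (by simp [ha])
    have h0 : g.2.getD 0 0 = a := by simp [ha]
    rw [h0, PySem.List.pySetD_of_nonneg _ _ hbi.1]
    have hia : a.toNat = i := by omega
    rw [hia, List.getElem?_set_self (by omega)]
  · next hlen =>
    rw [pvMulti_hit g.1 g.2 1 ns i hpw hb hi]

theorem pvScat_len (gs : List (String × List Int)) :
    ∀ (ns : List (Option String)), (pvScat gs ns).length = ns.length := by
  induction gs with
  | nil => intro ns; rfl
  | cons g t ih =>
    intro ns
    unfold pvScat at *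
    rw [List.foldl_cons, ih, pvGroupStep_len]

theorem pvScat_skip (gs : List (String × List Int)) :
    ∀ (ns : List (Option String)) (i : Nat),
      (∀ g ∈ gs, ∀ x ∈ g.2, 0 ≤ x) → (∀ g ∈ gs, (i : Int) ∉ g.2) →
      (pvScat gs ns)[i]? = ns[i]? := by
  induction gs with
  | nil => intro ns i _ _; rfl
  | cons g t ih =>
    intro ns i hnn hni
    unfold pvScat at *
    rw [List.foldl_cons, ih _ i (fun g' hg' => hnn g' (by simp [hg']))
      (fun g' hg' => hni g' (by simp [hg'])),
      pvGroupStep_skip ns g i (hnn g (by simp)) (hni g (by simp))]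

theorem pvScat_append_cons (gs1 gs2 : List (String × List Int)) (g : String × List Int)
    (ns : List (Option String)) :
    pvScat (gs1 ++ g :: gs2) ns = pvScat gs2 (pvGroupStep (pvScat gs1 ns) g) := by
  unfold pvScat
  rw [List.foldl_append, List.foldl_cons]

-- the names slot array holds, at every valid position i, exactly the final key the middle form uses
theorem pv_names (pairs : List (String × Option String)) (i : Nat) (p0 : String × Option String)
    (hget : pairs[i]? = some p0) :
    (pvScat ((PySem.Set.ofList (pairs.map Prod.fst)).map (fun k => (k, pvE k 0 pairs)))
      (List.replicate pairs.length none))[i]?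
    = some (some (if (pairs.map Prod.fst).count p0.1 = 1 then p0.1
        else p0.1 ++ " " ++ PySem.Int.toStr ((((pairs.map Prod.fst).take (i + 1)).count p0.1 : Int)))) := by
  have hk0 : p0.1 ∈ PySem.Set.ofList (pairs.map Prod.fst) := by
    rw [PySem.Set.mem_ofList]
    exact List.mem_of_getElem? (by rw [List.getElem?_map, hget]; rfl)
  have hnd : (PySem.Set.ofList (pairs.map Prod.fst)).Nodup := PySem.Set.nodup_ofList _
  obtain ⟨s1, s2, hsp⟩ := List.append_of_mem hk0
  have hk0s2 : p0.1 ∉ s2 := by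
    rw [hsp] at hnd
    exact (List.nodup_cons.mp ((List.nodup_append.mp hnd).2.1)).1
  have hm : ((i : Nat) : Int) ∈ pvE p0.1 0 pairs := by
    have := pvE_mem_of_get p0.1 pairs 0 i p0 hget rfl
    simpa using this
  rw [hsp, List.map_append, List.map_cons, pvScat_append_cons]
  have hlen1 : (pvScat (s1.map (fun k => (k, pvE k 0 pairs))) (List.replicate pairs.length none)).length
      = pairs.length := by
    rw [pvScat_len]
    exact List.length_replicate
  rw [pvScat_skip]
  · rw [pvGroupStep_hit _ _ i (pvE_pairwise p0.1 pairs 0)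
      (fun x hx => by
        have hb := pvE_mem_bounds p0.1 pairs 0 x hx
        constructor
        · omega
        · rw [hlen1]; omega) hm]
    have hct := pvE_count_take p0.1 pairs 0 ((i : Nat) : Int) hm
    have hi0 : (((i : Nat) : Int) - 0).toNat = i := by omega
    rw [hi0] at hct
    have harg : 1 + ((pvE p0.1 0 pairs).idxOf ((i : Nat) : Int) : Int)
        = ((((pairs.map Prod.fst).take (i + 1)).count p0.1 : Nat) : Int) := by
      rw [hct]
      push_cast
      ring
    dsimp only
    rw [pvE_length p0.1 pairs 0, harg]
  · intro g hg x hx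
    obtain ⟨k', hk', hfk⟩ := List.mem_map.mp hg
    rw [← hfk] at hx
    exact (pvE_mem_bounds k' pairs 0 x hx).1
  · intro g hg hmem
    obtain ⟨k', hk', hfk⟩ := List.mem_map.mp hg
    rw [← hfk] at hmem
    obtain ⟨j, q, hij, hjq, hqk⟩ := pvE_key_of_mem k' pairs 0 _ hmem
    have hji : j = i := by omega
    rw [hji, hget] at hjq
    cases hjq
    exact hk0s2 (hqk ▸ hk')

theorem pv_mem_enumerate {α : Type} :
    ∀ (l : List α) (s : Int), ∀ p ∈ PySem.List.enumerate l s,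
      ∃ j : Nat, p.1 = s + j ∧ l[j]? = some p.2 := by
  intro l
  induction l with
  | nil => intro s p hp; simp [PySem.List.enumerate_nil] at hp
  | cons a t ih =>
    intro s p hp
    rw [PySem.List.enumerate_cons] at hp
    rcases List.mem_cons.mp hp with h | h
    · exact ⟨0, by simp [h], by simp [h]⟩
    · obtain ⟨j, h1, h2⟩ := ih (s + 1) p h
      exact ⟨j + 1, by omega, by simpa using h2⟩

theorem pv_main (items_list : List (List (String × String))) :
    flatten_attributes_list_py items_list = flatten_attributes_list_py_alt items_list := by
  unfold flatten_attributes_list_py flatten_attributes_list_py_alt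
  by_cases h : items_list = []
  · simp [h]
  · rw [if_neg h, if_neg h]
    dsimp only
    set valid := items_list.filter pvKeyTruthy with hv
    set pairs := valid.map (fun item => (pvKeyOf item, (PySem.Dict.mk item).get? "v")) with hpairs
    -- A's body is the middle form
    rw [show (valid.foldl
        (fun (st : PySem.Dict String Int × PySem.Dict String (Option String)) item =>
          if (valid.foldl (fun d item => d.insert (pvKeyOf item) (d.getD (pvKeyOf item) 0 + 1))
                (PySem.Dict.empty : PySem.Dict String Int)).getD (pvKeyOf item) 0 > 1 then
            (st.1.insert (pvKeyOf item) (st.1.getD (pvKeyOf item) 0 + 1),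
             st.2.insert (pvKeyOf item ++ " " ++
               PySem.Int.toStr ((st.1.insert (pvKeyOf item) (st.1.getD (pvKeyOf item) 0 + 1)).getD (pvKeyOf item) 0))
               ((PySem.Dict.mk item).get? "v"))
          else
            (st.1, st.2.insert (pvKeyOf item) ((PySem.Dict.mk item).get? "v")))
        (PySem.Dict.empty, PySem.Dict.empty)).2 = pvMid pairs from pv_bodyA valid]
    -- B's positions dict
    have hfold : ((PySem.List.enumerate pairs).foldl
        (fun d p => d.modify p.2.1 [] (fun l => l ++ [p.1]))
        (PySem.Dict.empty : PySem.Dict String (List Int)))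
        = ((PySem.List.enumerate pairs).map (fun p => (p.2.1, p.1))).foldl
          (fun d q => d.modify q.1 [] (fun l => l ++ [q.2])) PySem.Dict.empty := by
      rw [List.foldl_map]
    have hgetD : ∀ c, ((PySem.List.enumerate pairs).foldl
        (fun d p => d.modify p.2.1 [] (fun l => l ++ [p.1]))
        (PySem.Dict.empty : PySem.Dict String (List Int))).getD c [] = pvE c 0 pairs := by
      intro c
      rw [hfold, PySem.Dict.getD_foldl_modify_append, PySem.Dict.getD_empty, List.nil_append,
        List.filter_map, List.map_map]
      unfold pvE
      simp [Function.comp_def]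
    have hkeys : ((PySem.List.enumerate pairs).foldl
        (fun d p => d.modify p.2.1 [] (fun l => l ++ [p.1]))
        (PySem.Dict.empty : PySem.Dict String (List Int))).keys
        = PySem.Set.ofList (pairs.map Prod.fst) := by
      rw [PySem.Dict.keys_foldl_modify_key (PySem.List.enumerate pairs)
        (fun p => p.2.1) ([] : List Int) (fun _ p => fun l => l ++ [p.1]) PySem.Dict.empty,
        PySem.Dict.keys_empty, PySem.Set.update_nil_left]
      congr 1
      have hc : (fun (p : Int × (String × Option String)) => p.2.1)
          = Prod.fst ∘ (fun p : Int × (String × Option String) => p.2) := rfl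
      rw [hc, ← List.map_map, PySem.List.map_snd_enumerate]
    have hnd : ((PySem.List.enumerate pairs).foldl
        (fun d p => d.modify p.2.1 [] (fun l => l ++ [p.1]))
        (PySem.Dict.empty : PySem.Dict String (List Int))).keys.Nodup := by
      rw [hkeys]
      exact PySem.Set.nodup_ofList _
    have hitems : ((PySem.List.enumerate pairs).foldl
        (fun d p => d.modify p.2.1 [] (fun l => l ++ [p.1]))
        (PySem.Dict.empty : PySem.Dict String (List Int))).items
        = (PySem.Set.ofList (pairs.map Prod.fst)).map (fun k => (k, pvE k 0 pairs)) := by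
      rw [PySem.Dict.items_eq_map_keys _ hnd ([] : List Int), hkeys]
      apply List.map_congr_left
      intro k _
      rw [hgetD k]
    rw [hitems]
    -- the names fold is the scatter loop
    have hns : ((PySem.Set.ofList (pairs.map Prod.fst)).map (fun k => (k, pvE k 0 pairs))).foldl
        (fun ns (g : String × List Int) =>
          if g.2.length = 1 then
            PySem.List.pySetD ns (g.2.getD 0 0) (some g.1)
          else
            (PySem.List.enumerate g.2 1).foldl
              (fun ns q => PySem.List.pySetD ns q.2 (some (g.1 ++ " " ++ PySem.Int.toStr q.1))) ns)
        (List.replicate pairs.length none)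
        = pvScat ((PySem.Set.ofList (pairs.map Prod.fst)).map (fun k => (k, pvE k 0 pairs)))
          (List.replicate pairs.length none) := rfl
    rw [hns]
    -- finally: the two enumerate-folds insert identical pairs
    unfold pvMid
    congr 1
    apply PySem.List.foldl_congr_mem
    intro acc p hp
    obtain ⟨j, hj1, hj2⟩ := pv_mem_enumerate pairs 0 p hp
    have hj1' : p.1 = ((j : Nat) : Int) := by omega
    congr 1
    rw [hj1', PySem.List.pyGetD_natCast, List.getD_eq_getElem?_getD,
      pv_names pairs j p.2 hj2]
    have hcast : ((j : Nat) : Int) + 1 = (((j + 1 : Nat) : Nat) : Int) := by push_cast; ring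
    rw [hcast, PySem.List.slice_to_natCast]
    simp

-- ===== VERDICT (by name: the statement is the Claim_ definition above) =====
theorem flatten_attributes_list_py_spec : Claim_equal_flatten_attributes_list_py := by
  intro items_list _
  exact pv_main items_list
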